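-- pv_equiv track=rewrite | github.com/DKev2P24/T2 | 11 matriz magica.py | matriz_magica
-- ===== SOURCE A (Python) =====
-- def matriz_magica(matriz):
--     n = len(matriz) #Obtener el tamaño de la matriz
--     for fila in matriz:
--         if len(fila) !=n: #Si una fila no tiene n elementos, no es cuadrada
--             return False
--
--     suma_ref = 0
--     for elemento in matriz[0]: #Se indexa desde 0
--         suma_ref += elemento #Suma la primera fila como referencia
--
--
--     for fila in matriz: #Comprueba la suma de cada fila
--         sumar_fila = 0
--         for elemento in fila:
--             sumar_fila += elemento #Suma cada elemento de la fila
--         if sumar_fila != suma_ref: #Si es distinta a la de referencia, retorna falso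
--             return False
--
--
--     for columna in range(n): #Comprueba la suma de cada columna
--         sumar_columna = 0
--         for fila in range(n):
--             sumar_columna += matriz[fila][columna] #Suma los elementos de la columna actual
--         if sumar_columna != suma_ref: #Si es distinta a la de referencia, retorna falso
--             return False
--
--     sum_diag_1 = 0 #Suma los elementos de la diagonal de izquierda a derecha
--     for i in range(n):
--         sum_diag_1 += matriz[i][i] #Elementos de la diagonal principal, en este caso, 0,0 (esquina superior izquierda) 1,1 (fila 2 columna 2), etc.
--     if sum_diag_1 != suma_ref:
--         return False
--
--     sum_diag_2 = 0 #Suma los elementos de la diagonal de derecha a izquierda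
--     for i in range(n):
--         sum_diag_2 += matriz[i][n - i - 1] #La indexación de filas sigue igual, pero para las columnas, se incia desde la esquina superior derecha, que sería n - i - 1 (porque se indexa desde 0)
--     if sum_diag_2 != suma_ref:
--         return False
--
--     return True #Retorna verdadero si cumple con todo
-- ===== SOURCE B (Python) =====
-- def matriz_magica(matriz):
--     n = len(matriz)
--     for fila in matriz:
--         if len(fila) != n:
--             return False
--     ref = sum(matriz[0])
--     col = [0] * n
--     d1 = 0
--     d2 = 0
--     ok = True
--     i = 0
--     for fila in matriz:
--         if sum(fila) != ref:
--             ok = False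
--         col = [c + x for c, x in zip(col, fila)]
--         d1 += fila[i]
--         d2 += fila[n - 1 - i]
--         i += 1
--     return ok and all(c == ref for c in col) and d1 == ref and d2 == ref
-- ===== Notes on version B (the rewrite author's own statement) =====
-- stated objective: alternative
-- what changed: Fuses A's five staged scans (rows, an index-based column double loop, two diagonal loops) into a single pass over the rows that maintains a running column-sum vector by elementwise zip addition plus both diagonal accumulators and a row-ok flag, comparing everything at the end.
import Mathlib
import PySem

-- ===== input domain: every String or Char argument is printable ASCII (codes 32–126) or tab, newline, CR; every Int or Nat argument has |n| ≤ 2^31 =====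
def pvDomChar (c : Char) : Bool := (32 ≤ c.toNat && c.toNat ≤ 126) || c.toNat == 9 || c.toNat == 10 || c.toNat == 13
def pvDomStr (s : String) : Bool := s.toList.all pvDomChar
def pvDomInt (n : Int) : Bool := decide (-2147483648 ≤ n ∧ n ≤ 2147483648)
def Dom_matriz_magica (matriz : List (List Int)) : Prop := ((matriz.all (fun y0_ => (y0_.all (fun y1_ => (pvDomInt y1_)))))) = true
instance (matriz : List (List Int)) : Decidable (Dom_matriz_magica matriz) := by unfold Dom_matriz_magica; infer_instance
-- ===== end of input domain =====

-- B fuses A's five staged scans into ONE pass over the rows that maintains a running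
-- column-sum vector (elementwise zip addition), both diagonal accumulators and a
-- row-ok flag, comparing everything at the end (objective: alternative decomposition).

-- ===== PORT A =====
-- The early-return row-length scan is List.any; each accumulator loop is a foldl over the
-- same elements. Inside the column/diagonal loops every index is in range once the length
-- guard has passed, so getD transcribes matriz[fila][columna] exactly there.
def matriz_magica (matriz : List (List Int)) : Bool :=
  let n := matriz.length
  if matriz.any (fun fila => fila.length ≠ n) then false else
  let suma_ref := (matriz.headD []).foldl (· + ·) 0
  if matriz.any (fun fila => fila.foldl (· + ·) 0 ≠ suma_ref) then false else
  if (List.range n).any (fun columna =>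
      (List.range n).foldl (fun acc fila => acc + ((matriz.getD fila []).getD columna 0)) 0 ≠ suma_ref)
    then false else
  let sum_diag_1 := (List.range n).foldl (fun acc i => acc + ((matriz.getD i []).getD i 0)) 0
  if sum_diag_1 ≠ suma_ref then false else
  let sum_diag_2 := (List.range n).foldl (fun acc i => acc + ((matriz.getD i []).getD (n - i - 1) 0)) 0
  if sum_diag_2 ≠ suma_ref then false else
  true

-- ===== PORT B =====
-- The single for-loop is one foldl over the rows; the state is ((col, d1, d2, ok), i).
-- After the length guard every index i and n-1-i is in range, so getD is exact; zip on
-- equal-length lists is List.zipWith.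
def matriz_magica_alt (matriz : List (List Int)) : Bool :=
  let n := matriz.length
  if matriz.any (fun fila => fila.length ≠ n) then false else
  let ref := (matriz.headD []).sum
  let st := matriz.foldl
    (fun (s : (List Int × Int × Int × Bool) × Nat) fila =>
      ((List.zipWith (· + ·) s.1.1 fila,
        s.1.2.1 + fila.getD s.2 0,
        s.1.2.2.1 + fila.getD (n - 1 - s.2) 0,
        s.1.2.2.2 && (fila.sum == ref)), s.2 + 1))
    ((List.replicate n 0, 0, 0, true), 0)
  st.1.2.2.2 && st.1.1.all (fun c => c == ref) && (st.1.2.1 == ref) && (st.1.2.2.1 == ref)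

-- ===== PRECONDITION & SPEC =====
-- Pre_ excludes only the empty matrix, on which A raises IndexError at matriz[0] (B raises there too).
def Pre_matriz_magica (matriz : List (List Int)) : Prop := matriz ≠ []
instance (matriz : List (List Int)) : Decidable (Pre_matriz_magica matriz) := by unfold Pre_matriz_magica; infer_instance
def pvWitness_matriz_magica : List (List Int) := [[2, 7, 6], [9, 5, 1], [4, 3, 8]]
def Spec_matriz_magica (matriz : List (List Int)) (out : Bool) : Prop := out = matriz_magica_alt matriz
instance (matriz : List (List Int)) (out : Bool) : Decidable (Spec_matriz_magica matriz out) := by unfold Spec_matriz_magica; infer_instance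

-- ===== CLAIM (what is proved, stated in full; the proofs are below) =====
def Claim_equal_matriz_magica : Prop := ∀ (matriz : List (List Int)), Dom_matriz_magica matriz → Pre_matriz_magica matriz → Spec_matriz_magica matriz (matriz_magica matriz)

-- ===== LEMMAS AND PROOFS =====

-- closed forms for the three accumulators of B's fused loop
def pvColAcc (col : List Int) (rows : List (List Int)) : List Int :=
  match rows with
  | [] => col
  | r :: rs => pvColAcc (List.zipWith (· + ·) col r) rs

def pvDiag1 (rows : List (List Int)) (i : Nat) : Int :=
  match rows with
  | [] => 0
  | r :: rs => r.getD i 0 + pvDiag1 rs (i + 1)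

def pvDiag2 (rows : List (List Int)) (j : Nat) : Int :=
  match rows with
  | [] => 0
  | r :: rs => r.getD j 0 + pvDiag2 rs (j - 1)

theorem pv_foldl_add_eq_sum_map {α : Type} (f : α → Int) (l : List α) (a : Int) :
    l.foldl (fun acc x => acc + f x) a = a + (l.map f).sum := by
  induction l generalizing a with
  | nil => simp
  | cons x xs ih => simp [List.foldl, ih, add_assoc]

theorem pv_foldl_add_self (l : List Int) : l.foldl (· + ·) 0 = l.sum := by
  simpa using pv_foldl_add_eq_sum_map id l 0

theorem pv_map_getD_range {α : Type} (l : List α) (d : α) :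
    (List.range l.length).map (fun i => l.getD i d) = l := by
  induction l with
  | nil => simp
  | cons x xs ih =>
    simp only [List.length_cons, List.range_succ_eq_map, List.map_cons, List.map_map]
    refine congrArg (x :: ·) ?_
    simpa [Function.comp] using ih

theorem pv_map_range_getD {α β : Type} (l : List α) (d : α) (g : α → β) :
    (List.range l.length).map (fun i => g (l.getD i d)) = l.map g := by
  rw [show (fun i => g (l.getD i d)) = g ∘ (fun i => l.getD i d) from rfl,
    ← List.map_map, pv_map_getD_range]

-- B's fold, characterised component-wise
theorem pv_fold_char (n : Nat) (ref : Int) (rows : List (List Int)) :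
    ∀ (col : List Int) (d1 d2 : Int) (ok : Bool) (i : Nat),
    rows.foldl
      (fun (s : (List Int × Int × Int × Bool) × Nat) fila =>
        ((List.zipWith (· + ·) s.1.1 fila,
          s.1.2.1 + fila.getD s.2 0,
          s.1.2.2.1 + fila.getD (n - 1 - s.2) 0,
          s.1.2.2.2 && (fila.sum == ref)), s.2 + 1))
      ((col, d1, d2, ok), i)
    = ((pvColAcc col rows, d1 + pvDiag1 rows i, d2 + pvDiag2 rows (n - 1 - i),
        ok && rows.all (fun r => r.sum == ref)), i + rows.length) := by
  induction rows with
  | nil => intro col d1 d2 ok i; simp [pvColAcc, pvDiag1, pvDiag2]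
  | cons r rs ih =>
    intro col d1 d2 ok i
    have h2 : n - 1 - (i + 1) = n - 1 - i - 1 := by omega
    simp only [List.foldl_cons, ih, pvColAcc, pvDiag1, pvDiag2, List.all_cons,
      List.length_cons, h2, add_assoc, Bool.and_assoc, Prod.mk.injEq, true_and, and_true]
    omega

theorem pv_colAcc_length (rows : List (List Int)) :
    ∀ col : List Int, (∀ r ∈ rows, r.length = col.length) →
    (pvColAcc col rows).length = col.length := by
  induction rows with
  | nil => intro col _; simp [pvColAcc]
  | cons r rs ih =>
    intro col h
    have hr : r.length = col.length := h r (by simp)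
    have hlen : (List.zipWith (· + ·) col r).length = col.length := by
      simp [List.length_zipWith, hr]
    rw [pvColAcc, ih _ (by intro x hx; rw [hlen]; exact h x (by simp [hx])), hlen]

theorem pv_zipWith_getD (col r : List Int) (h : r.length = col.length) (j : Nat) :
    (List.zipWith (· + ·) col r).getD j 0 = col.getD j 0 + r.getD j 0 := by
  by_cases hj : j < col.length
  · have hz : j < (List.zipWith (· + ·) col r).length := by simp [List.length_zipWith]; omega
    rw [List.getD_eq_getElem _ _ hz, List.getD_eq_getElem _ _ hj,
      List.getD_eq_getElem _ _ (by omega), List.getElem_zipWith]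
  · rw [List.getD_eq_default _ _ (by simp [List.length_zipWith]; omega),
      List.getD_eq_default _ _ (by omega), List.getD_eq_default _ _ (by omega)]
    simp

theorem pv_colAcc_getD (rows : List (List Int)) :
    ∀ col : List Int, (∀ r ∈ rows, r.length = col.length) → ∀ j : Nat,
    (pvColAcc col rows).getD j 0 = col.getD j 0 + (rows.map (fun r => r.getD j 0)).sum := by
  induction rows with
  | nil => intro col _ j; simp [pvColAcc]
  | cons r rs ih =>
    intro col h j
    have hr : r.length = col.length := h r (by simp)
    have hlen : (List.zipWith (· + ·) col r).length = col.length := by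
      simp [List.length_zipWith, hr]
    rw [pvColAcc, ih _ (by intro x hx; rw [hlen]; exact h x (by simp [hx])) j,
      pv_zipWith_getD col r hr j]
    simp [add_assoc]

theorem pv_getD_replicate (n j : Nat) : (List.replicate n (0 : Int)).getD j 0 = 0 := by
  by_cases h : j < n
  · rw [List.getD_eq_getElem _ _ (by simpa using h)]; simp
  · rw [List.getD_eq_default _ _ (by simpa using h)]

theorem pv_diag1_eq (rows : List (List Int)) :
    ∀ k : Nat, pvDiag1 rows k
      = ((List.range rows.length).map (fun i => (rows.getD i []).getD (k + i) 0)).sum := by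
  induction rows with
  | nil => intro k; simp [pvDiag1]
  | cons r rs ih =>
    intro k
    have hm : List.map ((fun i => ((r :: rs).getD i []).getD (k + i) 0) ∘ Nat.succ)
        (List.range rs.length)
        = List.map (fun i => (rs.getD i []).getD (k + 1 + i) 0) (List.range rs.length) := by
      refine List.map_congr_left fun i _ => ?_
      simp only [Function.comp_apply, List.getD_cons_succ]
      congr 1
      omega
    rw [pvDiag1, ih (k + 1)]
    simp only [List.length_cons, List.range_succ_eq_map, List.map_cons, List.map_map,
      List.sum_cons, hm]
    simp

theorem pv_diag2_eq (rows : List (List Int)) :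
    ∀ k : Nat, pvDiag2 rows k
      = ((List.range rows.length).map (fun i => (rows.getD i []).getD (k - i) 0)).sum := by
  induction rows with
  | nil => intro k; simp [pvDiag2]
  | cons r rs ih =>
    intro k
    have hm : List.map ((fun i => ((r :: rs).getD i []).getD (k - i) 0) ∘ Nat.succ)
        (List.range rs.length)
        = List.map (fun i => (rs.getD i []).getD (k - 1 - i) 0) (List.range rs.length) := by
      refine List.map_congr_left fun i _ => ?_
      simp only [Function.comp_apply, List.getD_cons_succ]
      congr 1
      omega
    rw [pvDiag2, ih (k - 1)]
    simp only [List.length_cons, List.range_succ_eq_map, List.map_cons, List.map_map,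
      List.sum_cons, hm]
    simp

-- a list is all-equal-to-ref iff every getD over its index range is ref
theorem pv_all_getD (l : List Int) (ref : Int) :
    (l.all (fun c => c == ref) = true) ↔ (∀ j < l.length, l.getD j 0 = ref) := by
  rw [List.all_eq_true]
  constructor
  · intro h j hj
    rw [List.getD_eq_getElem _ _ hj]
    exact beq_iff_eq.mp (h _ (l.getElem_mem hj))
  · intro h x hx
    obtain ⟨j, hj, rfl⟩ := List.mem_iff_getElem.mp hx
    rw [beq_iff_eq, ← List.getD_eq_getElem l 0 hj]
    exact h j hj

-- ===== VERDICT (by name: the statement is the Claim_ definition above) =====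
theorem matriz_magica_spec : Claim_equal_matriz_magica := by
  intro matriz _ _
  unfold Spec_matriz_magica matriz_magica matriz_magica_alt
  by_cases hsq : matriz.any (fun fila => fila.length ≠ matriz.length)
  · simp only []
    rw [if_pos hsq, if_pos hsq]
  · simp only []
    rw [if_neg hsq, if_neg hsq, pv_fold_char]
    simp only [pv_foldl_add_self, zero_add, Nat.sub_zero, Bool.true_and]
    have hrowlen : ∀ r ∈ matriz, r.length = (List.replicate matriz.length (0 : Int)).length := by
      intro r hr
      have h := List.any_eq_true.not.mp hsq
      push_neg at h
      have := h r hr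
      simpa using this
    have hcolget := pv_colAcc_getD matriz _ hrowlen
    have hcollen := pv_colAcc_length matriz _ hrowlen
    simp only [List.length_replicate] at hcollen
    have hcolA : ∀ j, (List.range matriz.length).foldl
        (fun acc fila => acc + ((matriz.getD fila []).getD j 0)) 0
        = (matriz.map (fun fila => fila.getD j 0)).sum := by
      intro j
      rw [pv_foldl_add_eq_sum_map (fun fila => (matriz.getD fila []).getD j 0)
        (List.range matriz.length) 0, zero_add,
        pv_map_range_getD matriz [] (fun fila => fila.getD j 0)]
    have hd1 : (List.range matriz.length).foldl
        (fun acc i => acc + ((matriz.getD i []).getD i 0)) 0 = pvDiag1 matriz 0 := by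
      rw [pv_foldl_add_eq_sum_map, zero_add, pv_diag1_eq]
      simp
    have hd2 : (List.range matriz.length).foldl
        (fun acc i => acc + ((matriz.getD i []).getD (matriz.length - i - 1) 0)) 0
        = pvDiag2 matriz (matriz.length - 1) := by
      rw [pv_foldl_add_eq_sum_map, zero_add, pv_diag2_eq]
      refine (congrArg List.sum (List.map_congr_left fun i _ => ?_)).symm
      congr 1
      omega
    rw [Bool.eq_iff_iff]
    constructor
    · intro h
      split_ifs at h with c1 c2 c3 c4
      simp only [List.any_eq_true, decide_eq_true_eq, not_exists] at c1 c2
      push_neg at c1 c2 c3 c4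
      have hok : matriz.all (fun r => r.sum == (matriz.headD []).sum) = true := by
        rw [List.all_eq_true]
        intro r hr
        exact beq_iff_eq.mpr (c1 r hr)
      have hcol : (pvColAcc (List.replicate matriz.length 0) matriz).all
          (fun c => c == (matriz.headD []).sum) = true := by
        rw [pv_all_getD]
        intro j hj
        rw [hcolget j, pv_getD_replicate, zero_add]
        have := c2 j (List.mem_range.mpr (by omega))
        rw [hcolA j] at this
        exact this
      rw [hd1] at c3
      rw [hd2] at c4
      simp only [Bool.and_eq_true, beq_iff_eq]
      exact ⟨⟨⟨hok, hcol⟩, c3⟩, c4⟩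
    · intro h
      simp only [Bool.and_eq_true, beq_iff_eq] at h
      obtain ⟨⟨⟨hok, hcol⟩, h1⟩, h2⟩ := h
      have c1 : ¬ ∃ x ∈ matriz, ¬ x.sum = (matriz.headD []).sum := by
        rintro ⟨r, hr, hne⟩
        exact hne (beq_iff_eq.mp (List.all_eq_true.mp hok r hr))
      have c2 : ¬ ∃ j ∈ List.range matriz.length,
          ¬ (List.range matriz.length).foldl
            (fun acc fila => acc + ((matriz.getD fila []).getD j 0)) 0
            = (matriz.headD []).sum := by
        rintro ⟨j, hj, hne⟩
        rw [List.mem_range] at hj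
        rw [hcolA j] at hne
        have := (pv_all_getD _ _).mp hcol j (by omega)
        rw [hcolget j, pv_getD_replicate, zero_add] at this
        exact hne this
      rw [if_neg (by simpa using c1), if_neg (by simpa using c2),
        if_neg (by rw [hd1]; simpa using h1), if_neg (by rw [hd2]; simpa using h2)]
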